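-- pv_equiv track=rewrite | github.com/arcaputo3/algorithms | simulations/quant_sims.py | digit_prod_sum
-- ===== SOURCE A (Python) =====
-- def digit_prod_sum(n=10000):
--     ss = 0
--     for i in range(n):
--         prod = 1
--         for v in str(i):
--             prod *= 1 if v == '0' else int(v)
--         ss += prod
--
--     return ss
-- ===== SOURCE B (Python) =====
-- def digit_prod_sum(n=10000):
--     # Horner-style digit DP over the decimal digits of n (one pass over len(str(n))
--     # digits) instead of A's loop over every i < n.
--     if n <= 0:
--         return 0
--     ss = 0
--     pref = 1
--     for c in str(n):
--         d = int(c)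
--         ss = ss * 46 + pref * (0 if d == 0 else 1 + d * (d - 1) // 2)
--         pref *= 1 if d == 0 else d
--     return ss
-- ===== Notes on version B (the rewrite author's own statement) =====
-- stated objective: faster
-- what changed: Replaced the loop over all i < n (each computing its digit product from str(i)) by a one-pass Horner-style digit DP over the decimal digits of n, using that a complete block of numbers with a fixed count of free digits contributes a constant per-digit factor.
import Mathlib
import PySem

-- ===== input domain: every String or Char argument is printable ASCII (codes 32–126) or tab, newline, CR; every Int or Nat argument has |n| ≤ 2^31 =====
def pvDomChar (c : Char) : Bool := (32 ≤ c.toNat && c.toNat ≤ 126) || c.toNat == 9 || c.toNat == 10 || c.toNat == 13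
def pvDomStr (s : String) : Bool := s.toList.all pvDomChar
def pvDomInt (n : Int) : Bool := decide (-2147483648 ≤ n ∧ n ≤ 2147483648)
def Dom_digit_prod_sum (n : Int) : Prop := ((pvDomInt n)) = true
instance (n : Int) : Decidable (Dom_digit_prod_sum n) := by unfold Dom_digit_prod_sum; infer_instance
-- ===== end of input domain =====

-- B replaces A's loop over all i < n by a one-pass Horner-style digit DP over the digits of n (faster).

-- ===== PORT A =====
-- for i in range(n): prod over chars of str(i) (0 counted as 1), summed.
-- int(v) is ported as (ofChars? [v]).getD 0; v is always a decimal digit of str(i), so ofChars? is some there and the default is never used.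
def digit_prod_sum (n : Int) : Int :=
  (PySem.List.pyRange 0 n 1).foldl (fun ss i =>
    ss + ((PySem.Int.toStr i).toList.foldl (fun prod v =>
      prod * (if v = '0' then 1 else (PySem.Int.ofChars? [v]).getD 0)) 1)) 0

-- ===== PORT B =====
-- int(c) is ported as (ofChars? [c]).getD 0; c is always a decimal digit of str(n) (n > 0), so the default is never used.
-- 46 ** nonneg exponents never appear: B uses no powers; d*(d-1)//2 is floordiv on nonnegative ints.
def digit_prod_sum_alt (n : Int) : Int :=
  if n ≤ 0 then 0
  else
    ((PySem.Int.toStr n).toList.foldl (fun (p : Int × Int) c =>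
      let d : Int := (PySem.Int.ofChars? [c]).getD 0
      (p.1 * 46 + p.2 * (if d = 0 then 0 else 1 + PySem.Int.floordiv (d * (d - 1)) 2),
       p.2 * (if d = 0 then 1 else d))) ((0 : Int), (1 : Int))).1

-- ===== PRECONDITION & SPEC =====
def Spec_digit_prod_sum (n : Int) (out : Int) : Prop := out = digit_prod_sum_alt n
instance (n : Int) (out : Int) : Decidable (Spec_digit_prod_sum n out) := by unfold Spec_digit_prod_sum; infer_instance

-- ===== CLAIM (what is proved, stated in full; the proofs are below) =====
def Claim_equal_digit_prod_sum : Prop := ∀ (n : Int), Dom_digit_prod_sum n → Spec_digit_prod_sum n (digit_prod_sum n)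

-- ===== LEMMAS AND PROOFS =====

-- weight of a single decimal digit: 0 counts as 1
def wn (d : Nat) : Int := if d = 0 then 1 else (d : Int)

-- digit product of a natural number (0 ↦ 1 via wn 0 = 1)
def Pn (n : Nat) : Int :=
  if _h : n < 10 then wn n else Pn (n / 10) * wn (n % 10)
termination_by n
decreasing_by exact Nat.div_lt_self (by omega) (by omega)

-- sum of Pn over 0..m-1 (the mathematical value of A)
def Sn (m : Nat) : Int := ((List.range m).map Pn).sum

-- sum of digit weights below d (the per-digit factor in B)
def Ws (d : Nat) : Int := ((List.range d).map wn).sum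

-- single-char digit facts (10 cases each)
lemma wd_char : ∀ d, d < 10 →
    (if Nat.digitChar d = '0' then (1:Int) else (PySem.Int.ofChars? [Nat.digitChar d]).getD 0) = wn d := by
  decide

lemma bd_char : ∀ d, d < 10 → ((PySem.Int.ofChars? [Nat.digitChar d]).getD 0 : Int) = (d : Int) := by
  decide

lemma bW_char : ∀ d : Nat, d < 10 →
    (if (d:Int) = 0 then (0:Int) else 1 + PySem.Int.floordiv ((d:Int) * ((d:Int) - 1)) 2) = Ws d := by
  decide

lemma bw_char : ∀ d : Nat, d < 10 → (if (d:Int) = 0 then (1:Int) else (d:Int)) = wn d := by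
  decide

-- A's inner digit-product loop
def chProd (cs : List Char) : Int :=
  cs.foldl (fun prod v => prod * (if v = '0' then 1 else (PySem.Int.ofChars? [v]).getD 0)) 1

lemma core_acc (f : Nat) : ∀ (n : Nat) (l : List Char),
    Nat.toDigitsCore 10 f n l = Nat.toDigitsCore 10 f n [] ++ l := by
  induction f with
  | zero => intro n l; simp [Nat.toDigitsCore]
  | succ f ih =>
    intro n l
    simp only [Nat.toDigitsCore]
    by_cases h : n / 10 = 0
    · simp [h]
    · simp only [if_neg h]
      rw [ih (n / 10) [(n % 10).digitChar], ih (n / 10) ((n % 10).digitChar :: l)]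
      simp

lemma Pn_lt (n : Nat) (h : n < 10) : Pn n = wn n := by
  rw [Pn]; exact dif_pos h

lemma Pn_ge (n : Nat) (h : ¬ n < 10) : Pn n = Pn (n / 10) * wn (n % 10) := by
  rw [Pn]; exact dif_neg h

lemma core_prod (f : Nat) : ∀ n, n < f → chProd (Nat.toDigitsCore 10 f n []) = Pn n := by
  induction f with
  | zero => omega
  | succ f ih =>
    intro n hn
    simp only [Nat.toDigitsCore]
    by_cases h : n / 10 = 0
    · have h10 : n < 10 := by omega
      have hm : n % 10 = n := Nat.mod_eq_of_lt h10
      simp only [if_pos h, chProd, List.foldl_cons, List.foldl_nil, one_mul]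
      rw [hm, wd_char n h10, Pn_lt n h10]
    · simp only [if_neg h]
      rw [core_acc, chProd, List.foldl_append]
      have hdiv : n / 10 < f := by omega
      have : (Nat.toDigitsCore 10 f (n / 10) []).foldl
          (fun prod v => prod * (if v = '0' then 1 else (PySem.Int.ofChars? [v]).getD 0)) 1
          = Pn (n / 10) := ih (n / 10) hdiv
      rw [this]
      simp only [List.foldl_cons, List.foldl_nil]
      rw [wd_char (n % 10) (Nat.mod_lt n (by omega)), Pn_ge n (by omega)]

lemma core_digits (f : Nat) : ∀ n, n < f → ∃ ds : List Nat,
    (∀ d ∈ ds, d < 10) ∧ Nat.toDigitsCore 10 f n [] = ds.map Nat.digitChar ∧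
    ds.foldl (fun a d => 10 * a + d) 0 = n := by
  induction f with
  | zero => omega
  | succ f ih =>
    intro n hn
    simp only [Nat.toDigitsCore]
    by_cases h : n / 10 = 0
    · refine ⟨[n % 10], ?_, by simp [h], ?_⟩
      · intro d hd; simp at hd; omega
      · simp; omega
    · obtain ⟨ds, hlt, hmap, hval⟩ := ih (n / 10) (by omega)
      refine ⟨ds ++ [n % 10], ?_, ?_, ?_⟩
      · intro d hd
        rcases List.mem_append.1 hd with hd | hd
        · exact hlt d hd
        · simp at hd; omega
      · rw [if_neg h, core_acc, hmap]; simp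
      · rw [List.foldl_append, hval]; simp; omega

lemma Pn_mul (q d : Nat) (hd : d < 10) : Pn (10 * q + d) = Pn q * wn d := by
  by_cases hq : q = 0
  · subst hq
    have h : 10 * 0 + d = d := by omega
    rw [h, Pn_lt 0 (by omega), Pn_lt d hd]
    simp [wn]
  · rw [Pn_ge (10 * q + d) (by omega)]
    have h1 : (10 * q + d) / 10 = q := by omega
    have h2 : (10 * q + d) % 10 = d := by omega
    rw [h1, h2]

lemma Sn_succ (m : Nat) : Sn (m + 1) = Sn m + Pn m := by
  simp [Sn, List.range_succ]

lemma Sn_ten (q : Nat) : Sn (10 * q) = 46 * Sn q := by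
  induction q with
  | zero => simp [Sn]
  | succ q ih =>
    have h : 10 * (q + 1) = 10 * q + 10 := by ring
    rw [h, Sn, List.range_add, List.map_append, List.sum_append]
    have hc : (List.range 10).map (fun x => Pn (10 * q + x))
        = (List.range 10).map (fun x => Pn q * wn x) := by
      apply List.map_congr_left
      intro x hx
      exact Pn_mul q x (List.mem_range.1 hx)
    simp only [List.map_map, Function.comp_def]
    rw [hc, List.sum_map_mul_left]
    have h46 : ((List.range 10).map wn).sum = 46 := by decide
    rw [h46, Sn_succ]
    show Sn (10 * q) + Pn q * 46 = 46 * (Sn q + Pn q)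
    rw [ih]; ring

lemma Sn_step (q d : Nat) (hd : d < 10) : Sn (10 * q + d) = Sn q * 46 + Pn q * Ws d := by
  rw [Sn, List.range_add, List.map_append, List.sum_append]
  have hc : (List.range d).map (fun x => Pn (10 * q + x))
      = (List.range d).map (fun x => Pn q * wn x) := by
    apply List.map_congr_left
    intro x hx
    exact Pn_mul q x (by have := List.mem_range.1 hx; omega)
  simp only [List.map_map, Function.comp_def]
  rw [hc, List.sum_map_mul_left]
  show Sn (10 * q) + Pn q * ((List.range d).map wn).sum = Sn q * 46 + Pn q * Ws d
  rw [Sn_ten, Ws]; ring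

-- B's per-digit step, on digit values
def stepN (p : Int × Int) (d : Nat) : Int × Int := (p.1 * 46 + p.2 * Ws d, p.2 * wn d)

lemma horner (ds : List Nat) : (∀ d ∈ ds, d < 10) → ∀ v : Nat,
    ds.foldl stepN (Sn v, Pn v)
      = (Sn (ds.foldl (fun a d => 10 * a + d) v), Pn (ds.foldl (fun a d => 10 * a + d) v)) := by
  induction ds with
  | nil => intro _ v; rfl
  | cons d t ih =>
    intro hlt v
    have hd : d < 10 := hlt d (List.mem_cons_self ..)
    have hstep : stepN (Sn v, Pn v) d = (Sn (10 * v + d), Pn (10 * v + d)) := by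
      simp [stepN, Sn_step v d hd, Pn_mul v d hd]
    rw [List.foldl_cons, hstep, List.foldl_cons]
    exact ih (fun x hx => hlt x (List.mem_cons_of_mem _ hx)) (10 * v + d)

lemma toChars_nat (m : Nat) : PySem.Int.toChars (m : Int) = Nat.toDigits 10 m := by
  simp [PySem.Int.toChars]

lemma A_eq (n : Int) : digit_prod_sum n = if n ≤ 0 then 0 else Sn n.toNat := by
  by_cases hn : n ≤ 0
  · rw [if_pos hn]
    unfold digit_prod_sum
    rw [PySem.List.pyRange_one_eq_nil (by omega)]
    rfl
  · rw [if_neg hn]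
    unfold digit_prod_sum
    rw [PySem.List.pyRange_one, List.foldl_map, PySem.List.foldl_add]
    have hmap : (List.range (n - 0).toNat).map
        (fun k : Nat => ((PySem.Int.toStr (0 + (k : Int))).toList.foldl (fun prod v =>
          prod * (if v = '0' then 1 else (PySem.Int.ofChars? [v]).getD 0)) 1))
        = (List.range n.toNat).map Pn := by
      have h0 : (n - 0).toNat = n.toNat := by omega
      rw [h0]
      apply List.map_congr_left
      intro k _
      rw [zero_add, PySem.Int.toList_toStr, toChars_nat k]
      exact core_prod (k + 1) k (Nat.lt_succ_self k)
    rw [hmap, zero_add, Sn]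

lemma B_eq (n : Int) : digit_prod_sum_alt n = if n ≤ 0 then 0 else Sn n.toNat := by
  by_cases hn : n ≤ 0
  · simp [digit_prod_sum_alt, hn]
  · rw [if_neg hn]
    unfold digit_prod_sum_alt
    rw [if_neg hn, PySem.Int.toList_toStr]
    have hchars : PySem.Int.toChars n = Nat.toDigits 10 n.toNat := by
      simp [PySem.Int.toChars, not_lt.2 (by omega : (0:Int) ≤ n)]
    rw [hchars]
    obtain ⟨ds, hlt, hmap, hval⟩ :=
      core_digits (n.toNat + 1) n.toNat (Nat.lt_succ_self _)
    rw [Nat.toDigits, hmap, List.foldl_map]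
    have hcong : List.foldl (fun (p : Int × Int) d' =>
        let d : Int := (PySem.Int.ofChars? [Nat.digitChar d']).getD 0
        (p.1 * 46 + p.2 * (if d = 0 then 0 else 1 + PySem.Int.floordiv (d * (d - 1)) 2),
         p.2 * (if d = 0 then 1 else d))) ((0:Int), (1:Int)) ds
        = List.foldl stepN ((0:Int), (1:Int)) ds := by
      apply PySem.List.foldl_congr_mem
      intro acc x hx
      have hx10 : x < 10 := hlt x hx
      simp only [stepN]
      rw [bd_char x hx10, bW_char x hx10, bw_char x hx10]
    rw [hcong]
    have h01 : ((0:Int), (1:Int)) = (Sn 0, Pn 0) := by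
      have : Pn 0 = 1 := by rw [Pn_lt 0 (by omega)]; rfl
      simp [Sn, this]
    rw [h01, horner ds hlt 0, hval]

theorem digit_prod_sum_spec : Claim_equal_digit_prod_sum := by
  intro n _
  unfold Spec_digit_prod_sum
  rw [A_eq, B_eq]
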